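-- pv_equiv track=rewrite | github.com/VSennaa/allspark | AIS/simulation/TESTES_CHECKLIST/tx_gmsk_433.py | hdlc_encode
-- ===== SOURCE A (Python) =====
-- def hdlc_encode(payload_bytes):
--     # Convert to bit list
--     bits = []
--     for b in payload_bytes:
--         for i in range(8):
--             bits.append((b >> i) & 1)
--
--     # Bit stuffing
--     stuffed = []
--     ones = 0
--     for b in bits:
--         stuffed.append(b)
--         if b == 1:
--             ones += 1
--             if ones == 5:
--                 stuffed.append(0)  # stuff
--                 ones = 0
--         else:
--             ones = 0
--
--     flag = [0,1,1,1,1,1,1,0]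
--
--     return flag + stuffed + flag
-- ===== SOURCE B (Python) =====
-- def hdlc_encode(payload_bytes):
--     # LSB-first bit expansion, then stuffing by 5-bit lookahead instead of a counter.
--     bits = [(b >> i) & 1 for b in payload_bytes for i in range(8)]
--     flag = [0, 1, 1, 1, 1, 1, 1, 0]
--     out = list(flag)
--     i = 0
--     n = len(bits)
--     while i < n:
--         if bits[i:i + 5] == [1, 1, 1, 1, 1]:
--             out += [1, 1, 1, 1, 1, 0]
--             i += 5
--         else:
--             out.append(bits[i])
--             i += 1
--     out += flag
--     return out
-- ===== Notes on version B (the rewrite author's own statement) =====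
-- stated objective: alternative
-- what changed: A stuffs bits with a running ones-counter that increments and resets per bit; B instead scans the bit list with a 5-bit lookahead (slice compare against [1,1,1,1,1]), emitting the stuffed block and skipping 5 bits at once, with the bit expansion as a single comprehension instead of nested append loops.
import Mathlib
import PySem

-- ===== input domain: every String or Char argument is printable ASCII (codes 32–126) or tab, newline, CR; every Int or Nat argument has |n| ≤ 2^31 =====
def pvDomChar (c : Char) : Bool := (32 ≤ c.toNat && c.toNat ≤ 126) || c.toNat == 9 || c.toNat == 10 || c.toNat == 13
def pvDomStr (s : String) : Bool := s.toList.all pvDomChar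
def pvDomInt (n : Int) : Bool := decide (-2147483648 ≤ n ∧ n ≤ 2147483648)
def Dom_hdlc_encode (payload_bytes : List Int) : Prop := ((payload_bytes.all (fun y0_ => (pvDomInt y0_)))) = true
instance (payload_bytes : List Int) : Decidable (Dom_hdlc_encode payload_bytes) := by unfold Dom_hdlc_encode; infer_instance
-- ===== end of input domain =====

-- B replaces A's per-bit ones-counter stuffing loop by a single 5-bit-lookahead scan; objective: alternative (same cost).

-- ===== PORT A =====
-- body of A's stuffing loop (named so the fold is readable; same steps as the Python loop body)
def pvStepA (st : List Int × Int) (b : Int) : List Int × Int :=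
  let stuffed := st.1 ++ [b]
  if b = 1 then
    let ones := st.2 + 1
    if ones = 5 then (stuffed ++ [0], 0) else (stuffed, ones)
  else (stuffed, 0)

def hdlc_encode (payload_bytes : List Int) : List Int :=
  let bits : List Int :=
    payload_bytes.foldl
      (fun acc b => (List.range 8).foldl (fun acc2 i => acc2 ++ [PySem.Int.band (b >>> i) 1]) acc) []
  let p : List Int × Int := bits.foldl pvStepA ([], 0)
  let flag : List Int := [0,1,1,1,1,1,1,0]
  flag ++ p.1 ++ flag

-- ===== PORT B =====
-- B's while-loop over index i with slice lookahead bits[i:i+5], as recursion on the remaining bits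
def pvStuffLook : List Int → List Int
  | [] => []
  | b :: bs =>
    if (b :: bs).take 5 = [1,1,1,1,1] then
      [1,1,1,1,1,0] ++ pvStuffLook (bs.drop 4)
    else
      b :: pvStuffLook bs
termination_by bits => bits.length
decreasing_by all_goals (simp; try omega)

def hdlc_encode_alt (payload_bytes : List Int) : List Int :=
  let bits : List Int :=
    payload_bytes.flatMap (fun b => (List.range 8).map (fun i => PySem.Int.band (b >>> i) 1))
  let flag : List Int := [0,1,1,1,1,1,1,0]
  flag ++ pvStuffLook bits ++ flag

-- ===== PRECONDITION & SPEC =====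
def Spec_hdlc_encode (payload_bytes : List Int) (out : List Int) : Prop := out = hdlc_encode_alt payload_bytes
instance (payload_bytes : List Int) (out : List Int) : Decidable (Spec_hdlc_encode payload_bytes out) := by unfold Spec_hdlc_encode; infer_instance

-- ===== CLAIM (what is proved, stated in full; the proofs are below) =====
def Claim_equal_hdlc_encode : Prop := ∀ (payload_bytes : List Int), Dom_hdlc_encode payload_bytes → Spec_hdlc_encode payload_bytes (hdlc_encode payload_bytes)

-- ===== LEMMAS AND PROOFS =====

-- recursive form of A's counter-based stuffing loop (proof-side helper; counter as Nat)
def pvStuffRec : List Int → Nat → List Int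
  | [], _ => []
  | b :: bs, k =>
    if b = 1 then
      if k + 1 = 5 then b :: 0 :: pvStuffRec bs 0 else b :: pvStuffRec bs (k + 1)
    else b :: pvStuffRec bs 0

-- A's foldl stuffing loop equals pvStuffRec
theorem pv_foldl_stuff (bits : List Int) : ∀ (acc : List Int) (kn : Nat),
    (bits.foldl pvStepA (acc, (kn : Int))).1 = acc ++ pvStuffRec bits kn := by
  induction bits with
  | nil => intro acc kn; simp [pvStuffRec]
  | cons b bs ih =>
    intro acc kn
    rw [List.foldl_cons]
    by_cases hb : b = 1
    · subst hb
      by_cases hk : kn + 1 = 5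
      · have h5 : ((kn : Int) + 1 = 5) := by exact_mod_cast hk
        have hstep : pvStepA (acc, (kn : Int)) 1 = (acc ++ [1] ++ [0], ((0 : Nat) : Int)) := by
          simp [pvStepA, h5]
        rw [hstep, ih]
        simp [pvStuffRec, hk]
      · have h5 : ¬((kn : Int) + 1 = 5) := by exact_mod_cast hk
        have hstep : pvStepA (acc, (kn : Int)) 1 = (acc ++ [1], ((kn + 1 : Nat) : Int)) := by
          simp [pvStepA, h5]
        rw [hstep, ih]
        simp [pvStuffRec, hk]
    · have hstep : pvStepA (acc, (kn : Int)) b = (acc ++ [b], ((0 : Nat) : Int)) := by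
        simp [pvStepA, hb]
      rw [hstep, ih]
      simp [pvStuffRec, hb]

-- take of a longer replicate-prefix restricts
theorem pv_take_repl {m n : Nat} (bs : List Int) (h : m ≤ n)
    (hn : bs.take n = List.replicate n (1:Int)) : bs.take m = List.replicate m (1:Int) := by
  have : bs.take m = (bs.take n).take m := by rw [List.take_take, Nat.min_eq_left h]
  rw [this, hn, List.take_replicate, Nat.min_eq_left h]

-- main equivalence of the two stuffing strategies, by strong induction on length
theorem pv_stuff_main (n : Nat) :
    (∀ bits : List Int, bits.length ≤ n → pvStuffRec bits 0 = pvStuffLook bits) ∧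
    (∀ (bits : List Int) (k : Nat), bits.length ≤ n → k < 5 →
      bits.take (5 - k) ≠ List.replicate (5 - k) (1:Int) →
      pvStuffRec bits k = pvStuffLook bits) := by
  induction n with
  | zero =>
    constructor
    · intro bits h; have : bits = [] := List.eq_nil_of_length_eq_zero (Nat.le_zero.mp h)
      subst this; simp [pvStuffRec, pvStuffLook]
    · intro bits k h _ _; have : bits = [] := List.eq_nil_of_length_eq_zero (Nat.le_zero.mp h)
      subst this; simp [pvStuffRec, pvStuffLook]
  | succ n ih =>
    obtain ⟨ihQ, ihH⟩ := ih
    have H : ∀ (bits : List Int) (k : Nat), bits.length ≤ n + 1 → k < 5 →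
        bits.take (5 - k) ≠ List.replicate (5 - k) (1:Int) →
        pvStuffRec bits k = pvStuffLook bits := by
      intro bits k hlen hk hne
      match bits with
      | [] => simp [pvStuffRec, pvStuffLook]
      | b :: bs =>
        have hbs : bs.length ≤ n := by simpa using hlen
        by_cases hb : b = 1
        · subst hb
          have hk4 : k ≠ 4 := by
            intro hk4; subst hk4
            exact hne (by simp)
          have hk1 : k + 1 < 5 := by omega
          have hkk : ¬ (k + 1 = 5) := by omega
          have hne' : bs.take (5 - (k + 1)) ≠ List.replicate (5 - (k + 1)) (1:Int) := by
            intro hEq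
            apply hne
            have h1 : 5 - k = (4 - k) + 1 := by omega
            have h2 : 5 - (k + 1) = 4 - k := by omega
            rw [h2] at hEq
            rw [h1]
            simp [List.replicate_succ, List.take_succ_cons, hEq]
          have hlook : ¬ ((1 :: bs).take 5 = ([1,1,1,1,1] : List Int)) := by
            intro hEq
            apply hne'
            have h51 : (1 :: bs).take 5 = 1 :: bs.take 4 := by simp
            rw [h51] at hEq
            have h4 : bs.take 4 = List.replicate 4 (1:Int) := by
              have hr : ([1,1,1,1] : List Int) = List.replicate 4 1 := by decide
              rw [← hr]; exact ((List.cons.injEq _ _ _ _).mp hEq).2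
            have h2 : 5 - (k + 1) = 4 - k := by omega
            rw [h2]
            exact pv_take_repl bs (by omega) h4
          rw [pvStuffRec, if_pos rfl, if_neg hkk]
          rw [pvStuffLook, if_neg hlook]
          rw [ihH bs (k+1) hbs hk1 hne']
        · rw [pvStuffRec, if_neg hb]
          have hlook : ¬ ((b :: bs).take 5 = ([1,1,1,1,1] : List Int)) := by
            intro hEq
            apply hb
            have h51 : (b :: bs).take 5 = b :: bs.take 4 := by simp
            rw [h51] at hEq
            exact ((List.cons.injEq _ _ _ _).mp hEq).1
          rw [pvStuffLook, if_neg hlook]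
          rw [ihQ bs hbs]
    refine ⟨?_, H⟩
    intro bits hlen
    by_cases h5 : bits.take 5 = List.replicate 5 (1:Int)
    · -- bits starts with five ones
      have hlen5 : 5 ≤ bits.length := by
        by_contra hlt
        have := congrArg List.length h5
        simp at this
        omega
      have hsplit : bits = List.replicate 5 (1:Int) ++ bits.drop 5 := by
        conv_lhs => rw [← List.take_append_drop 5 bits]
        rw [h5]
      set rest := bits.drop 5 with hrest_def
      have hrest : rest.length ≤ n := by
        rw [hrest_def]
        simp
        omega
      have hrepl : List.replicate 5 (1:Int) ++ rest = 1 :: 1 :: 1 :: 1 :: 1 :: rest := by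
        simp [List.replicate_succ]
      have hrec : pvStuffRec (List.replicate 5 (1:Int) ++ rest) 0
          = [1,1,1,1,1,0] ++ pvStuffRec rest 0 := by
        rw [hrepl]
        simp [pvStuffRec]
      have hlook : pvStuffLook (List.replicate 5 (1:Int) ++ rest)
          = [1,1,1,1,1,0] ++ pvStuffLook rest := by
        rw [hrepl, pvStuffLook]
        have htake : (1 :: 1 :: 1 :: 1 :: 1 :: rest).take 5 = ([1,1,1,1,1] : List Int) := by
          simp
        rw [if_pos htake]
        simp
      rw [hsplit, hrec, hlook, ihQ rest hrest]
    · exact H bits 0 hlen (by omega) (by simpa using h5)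

theorem pv_stuff_eq (bits : List Int) : pvStuffRec bits 0 = pvStuffLook bits :=
  (pv_stuff_main bits.length).1 bits le_rfl

-- append-fold is map
theorem pv_foldl_app {α β : Type} (g : α → β) (l : List α) : ∀ (acc : List β),
    l.foldl (fun a x => a ++ [g x]) acc = acc ++ l.map g := by
  induction l with
  | nil => intro acc; simp
  | cons x xs ih => intro acc; simp [ih]

-- flat-append-fold is flatMap
theorem pv_foldl_flat {α β : Type} (g : α → List β) (l : List α) : ∀ (acc : List β),
    l.foldl (fun a x => a ++ g x) acc = acc ++ l.flatMap g := by
  induction l with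
  | nil => intro acc; simp
  | cons x xs ih => intro acc; simp [ih]

-- A's nested bit-building loops compute B's flatMap
theorem pv_bits_eq (payload_bytes : List Int) :
    payload_bytes.foldl
      (fun (acc : List Int) (b : Int) => (List.range 8).foldl (fun acc2 (i : Nat) => acc2 ++ [PySem.Int.band (b >>> i) 1]) acc) []
    = payload_bytes.flatMap (fun (b : Int) => (List.range 8).map (fun (i : Nat) => PySem.Int.band (b >>> i) 1)) := by
  have hstep : ∀ (acc : List Int) (b : Int),
      (List.range 8).foldl (fun acc2 (i : Nat) => acc2 ++ [PySem.Int.band (b >>> i) 1]) acc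
      = acc ++ (List.range 8).map (fun (i : Nat) => PySem.Int.band (b >>> i) 1) :=
    fun acc b => pv_foldl_app _ _ _
  simp only [hstep]
  simpa using pv_foldl_flat (fun (b : Int) => (List.range 8).map (fun (i : Nat) => PySem.Int.band (b >>> i) 1)) payload_bytes []

-- ===== VERDICT (by name: the statement is the Claim_ definition above) =====
theorem hdlc_encode_spec : Claim_equal_hdlc_encode := by
  intro payload_bytes _
  simp only [Spec_hdlc_encode, hdlc_encode, hdlc_encode_alt]
  rw [pv_bits_eq]
  have h0 : ((0 : Int)) = ((0 : Nat) : Int) := by norm_num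
  rw [h0, pv_foldl_stuff, pv_stuff_eq]
  simp
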